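-- pv_equiv track=rewrite | github.com/fangzhao2019/system_code-version2 | save_to_database/word_of_mouth/price.py | getRepeatPriceIndex
-- ===== SOURCE A (Python) =====
-- def getRepeatPriceIndex(list, car, config, province, time):
--     i = -1
--     index = -1
--     for record in list:
--         i = i + 1
--         if car == record['car_id'] and config == record['config'] and province == record['province'] and time == record[
--             'time']:
--             index = i
--     return index
-- ===== SOURCE B (Python) =====
-- def getRepeatPriceIndex(list, car, config, province, time):
--     for i in range(len(list) - 1, -1, -1):
--         record = list[i]
--         if car == record['car_id'] and config == record['config'] and province == record['province'] and time == record['time']: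
--             return i
--     return -1
-- ===== Notes on version B (the rewrite author's own statement) =====
-- stated objective: alternative
-- what changed: Replaces the forward full scan that keeps a running last-match index by a backward scan that returns immediately at the first (i.e. last) matching record.
import Mathlib
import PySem

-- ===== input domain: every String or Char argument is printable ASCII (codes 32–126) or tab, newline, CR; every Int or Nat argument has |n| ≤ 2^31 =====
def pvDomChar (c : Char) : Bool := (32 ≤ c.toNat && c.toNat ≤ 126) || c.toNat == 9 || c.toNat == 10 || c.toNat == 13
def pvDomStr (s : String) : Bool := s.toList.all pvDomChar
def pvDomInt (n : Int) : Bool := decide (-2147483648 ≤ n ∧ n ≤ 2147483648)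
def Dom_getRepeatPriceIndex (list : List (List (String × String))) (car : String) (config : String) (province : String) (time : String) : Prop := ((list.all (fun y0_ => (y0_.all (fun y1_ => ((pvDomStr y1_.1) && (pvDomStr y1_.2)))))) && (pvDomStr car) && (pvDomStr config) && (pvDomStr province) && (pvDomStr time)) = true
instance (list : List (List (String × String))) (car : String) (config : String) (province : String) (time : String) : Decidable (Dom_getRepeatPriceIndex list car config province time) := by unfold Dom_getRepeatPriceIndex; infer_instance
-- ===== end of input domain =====

-- B replaces A's forward scan with a running last-match index by a backward scan
-- that returns the index of the first match seen from the end (the last match).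

-- ===== PORT A =====
-- dict lookup record[k]: first matching key in the association list (none = KeyError)
def pvLookup (r : List (String × String)) (k : String) : Option String :=
  (r.find? (fun p => p.1 == k)).map (·.2)

-- the four-way equality test both Pythons perform on a record (inside Pre_ every
-- lookup Python actually evaluates succeeds, so this Bool is exactly its condition)
def pvMatch (car config province time : String) (r : List (String × String)) : Bool :=
  pvLookup r "car_id" == some car &&
    (pvLookup r "config" == some config &&
      (pvLookup r "province" == some province && pvLookup r "time" == some time))

def getRepeatPriceIndex (list : List (List (String × String))) (car : String) (config : String) (province : String) (time : String) : Int :=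
  (list.foldl
    (fun (s : Int × Int) record =>
      let i := s.1 + 1
      (i, if pvMatch car config province time record then i else s.2))
    (-1, -1)).2

-- ===== PORT B =====
-- loop 'for i in range(len(list)-1, -1, -1)': recursion on the count of remaining
-- indices; at argument n+1 the loop body runs with i = n
def altGo (list : List (List (String × String))) (car config province time : String) : Nat → Int
  | 0 => -1
  | n + 1 =>
    match list[n]? with
    | some record =>
        if pvMatch car config province time record then (n : Int)
        else altGo list car config province time n
    | none => altGo list car config province time n

def getRepeatPriceIndex_alt (list : List (List (String × String))) (car : String) (config : String) (province : String) (time : String) : Int :=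
  altGo list car config province time list.length

-- ===== PRECONDITION & SPEC =====
-- a record makes A raise KeyError iff a key is missing at the moment the
-- short-circuiting 'and' chain actually reads it; Pre_ excludes exactly those inputs
def pvRecOk (car config province : String) (r : List (String × String)) : Bool :=
  (pvLookup r "car_id").isSome &&
    (pvLookup r "car_id" != some car ||
      ((pvLookup r "config").isSome &&
        (pvLookup r "config" != some config ||
          ((pvLookup r "province").isSome &&
            (pvLookup r "province" != some province || (pvLookup r "time").isSome)))))

def Pre_getRepeatPriceIndex (list : List (List (String × String))) (car : String) (config : String) (province : String) (time : String) : Prop :=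
  list.all (pvRecOk car config province) = true

instance (list : List (List (String × String))) (car : String) (config : String) (province : String) (time : String) : Decidable (Pre_getRepeatPriceIndex list car config province time) := by unfold Pre_getRepeatPriceIndex; infer_instance

def pvWitness_getRepeatPriceIndex : (List (List (String × String))) × String × String × String × String :=
  ([[("car_id", "a"), ("config", "c"), ("province", "p"), ("time", "t")]], "a", "c", "p", "t")

def Spec_getRepeatPriceIndex (list : List (List (String × String))) (car : String) (config : String) (province : String) (time : String) (out : Int) : Prop := out = getRepeatPriceIndex_alt list car config province time
instance (list : List (List (String × String))) (car : String) (config : String) (province : String) (time : String) (out : Int) : Decidable (Spec_getRepeatPriceIndex list car config province time out) := by unfold Spec_getRepeatPriceIndex; infer_instance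

-- ===== CLAIM (what is proved, stated in full; the proofs are below) =====
def Claim_equal_getRepeatPriceIndex : Prop := ∀ (list : List (List (String × String))) (car : String) (config : String) (province : String) (time : String), Dom_getRepeatPriceIndex list car config province time → Pre_getRepeatPriceIndex list car config province time → Spec_getRepeatPriceIndex list car config province time (getRepeatPriceIndex list car config province time)

-- ===== LEMMAS AND PROOFS =====

-- the first component of A's fold just counts: it ends at s.1 + length
theorem foldA_fst (car config province time : String) (l : List (List (String × String))) (s : Int × Int) :
    (l.foldl
      (fun (s : Int × Int) record =>
        let i := s.1 + 1
        (i, if pvMatch car config province time record then i else s.2)) s).1 = s.1 + l.length := by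
  induction l generalizing s with
  | nil => simp
  | cons r t ih => simp [List.foldl_cons, ih]; push_cast; ring

-- B's helper never looks past index n, so appending a record is invisible below it
theorem altGo_append (car config province time : String)
    (l : List (List (String × String))) (r : List (String × String)) (n : Nat) (h : n ≤ l.length) :
    altGo (l ++ [r]) car config province time n = altGo l car config province time n := by
  induction n with
  | zero => rfl
  | succ m ih =>
    have hm : m < l.length := h
    have hget : (l ++ [r])[m]? = l[m]? := List.getElem?_append_left hm
    simp only [altGo, hget]
    rw [ih (Nat.le_of_lt hm)]

theorem main_eq (car config province time : String) (l : List (List (String × String))) :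
    getRepeatPriceIndex l car config province time = getRepeatPriceIndex_alt l car config province time := by
  induction l using List.reverseRecOn with
  | nil => rfl
  | append_singleton t r ih =>
    unfold getRepeatPriceIndex getRepeatPriceIndex_alt
    rw [List.foldl_append]
    simp only [List.foldl_cons, List.foldl_nil, List.length_append, List.length_cons,
      List.length_nil, Nat.zero_add]
    have hfst := foldA_fst car config province time t ((-1, -1) : Int × Int)
    have hget : (t ++ [r])[t.length]? = some r := by
      rw [List.getElem?_append_right (Nat.le_refl _)]
      simp
    simp only [altGo, hget]
    rw [altGo_append car config province time t r t.length (Nat.le_refl _)]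
    by_cases hp : pvMatch car config province time r
    · simp only [hp, if_true, hfst]
      norm_num
    · simp only [hp, if_false]
      
      unfold getRepeatPriceIndex getRepeatPriceIndex_alt at ih
      simpa using ih

-- ===== VERDICT (by name: the statement is the Claim_ definition above) =====
theorem getRepeatPriceIndex_spec : Claim_equal_getRepeatPriceIndex := by
  intro list car config province time _ _
  unfold Spec_getRepeatPriceIndex
  exact main_eq car config province time list
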